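-- pv_equiv track=rewrite | github.com/tomas-skalicky/interview_puzzles | src/main/python/com/skalicky/python/interviewpuzzles/find_first_recurring_character.py | first_recurring_char
-- ===== SOURCE A (Python) =====
-- def first_recurring_char(s: str) -> str:
--     if s is None:
--         return None
--     else:
--         string_length: int = len(s)
--         if string_length < 2:
--             return None
--         else:
--             previous_character: str = s[0]
--             for i in range(1, string_length):
--                 current_character: str = s[i]
--                 if current_character == previous_character:
--                     return previous_character
--                 else:
--                     previous_character = current_character
--             return None
-- ===== SOURCE B (Python) =====
-- def first_recurring_char(s: str) -> str:
--     if s is None: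
--         return None
--     # Pass 1: run-length encode the string into maximal runs of equal characters.
--     runs = []
--     for ch in s:
--         if runs and runs[-1][0] == ch:
--             runs[-1][1] += 1
--         else:
--             runs.append([ch, 1])
--     # Pass 2: the answer is the key of the first run of length >= 2.
--     for ch, cnt in runs:
--         if cnt >= 2:
--             return ch
--     return None
-- ===== Notes on version B (the rewrite author's own statement) =====
-- stated objective: alternative
-- what changed: B run-length encodes the string into maximal runs in one pass and then returns the key of the first run of length >= 2, instead of A's index loop comparing each character with its predecessor and returning inside the loop.
import Mathlib
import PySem

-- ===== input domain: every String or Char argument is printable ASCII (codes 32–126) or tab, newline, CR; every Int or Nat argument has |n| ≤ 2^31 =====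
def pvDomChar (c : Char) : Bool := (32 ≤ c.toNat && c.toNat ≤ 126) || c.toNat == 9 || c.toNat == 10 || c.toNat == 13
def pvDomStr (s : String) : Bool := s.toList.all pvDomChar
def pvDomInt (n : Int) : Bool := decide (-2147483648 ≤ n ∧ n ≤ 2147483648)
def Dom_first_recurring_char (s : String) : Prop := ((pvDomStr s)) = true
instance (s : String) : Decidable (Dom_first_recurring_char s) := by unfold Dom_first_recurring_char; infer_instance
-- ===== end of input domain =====

-- B run-length encodes the string into maximal runs and returns the first run-key with count ≥ 2 (alternative decomposition; A compares each character with its predecessor).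


-- ===== PORT A =====
-- A's for-loop over range(1, len(s)) with the running 'previous_character', as structural recursion.
def frcA_loop (prev : Char) : List Char → Option String
  | [] => none
  | c :: cs => if c = prev then some (String.ofList [prev]) else frcA_loop c cs

def first_recurring_char (s : String) : Option String :=
  if s.toList.length < 2 then none
  else
    match s.toList with
    | [] => none
    | c :: cs => frcA_loop c cs

-- ===== PORT B =====
-- Pass 1 of Source B: run-length encoding; the runs list is kept reversed (head = Python's runs[-1]) and reversed once at the end.
def frcB_step (runs : List (Char × Int)) (ch : Char) : List (Char × Int) :=
  match runs with
  | (c, n) :: rest => if c = ch then (c, n + 1) :: rest else (ch, 1) :: (c, n) :: rest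
  | [] => [(ch, 1)]

-- Pass 2 of Source B: first run with count ≥ 2.
def frcB_find : List (Char × Int) → Option String
  | [] => none
  | (c, n) :: rest => if n ≥ 2 then some (String.ofList [c]) else frcB_find rest

def first_recurring_char_alt (s : String) : Option String :=
  frcB_find ((s.toList.foldl frcB_step []).reverse)

-- ===== PRECONDITION & SPEC =====
def Spec_first_recurring_char (s : String) (out : Option String) : Prop := out = first_recurring_char_alt s
instance (s : String) (out : Option String) : Decidable (Spec_first_recurring_char s out) := by unfold Spec_first_recurring_char; infer_instance

-- ===== CLAIM (what is proved, stated in full; the proofs are below) =====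
def Claim_equal_first_recurring_char : Prop := ∀ (s : String), Dom_first_recurring_char s → Spec_first_recurring_char s (first_recurring_char s)

-- ===== LEMMAS AND PROOFS =====

theorem frcB_find_append (xs ys : List (Char × Int)) :
    frcB_find (xs ++ ys) = ((frcB_find xs).or (frcB_find ys)) := by
  induction xs with
  | nil => simp [frcB_find]
  | cons p rest ih =>
    obtain ⟨c, n⟩ := p
    simp only [List.cons_append, frcB_find]
    split_ifs <;> simp [ih]

theorem frcB_find_ones (xs : List (Char × Int)) (h : ∀ p ∈ xs, p.2 = 1) :
    frcB_find xs = none := by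
  induction xs with
  | nil => rfl
  | cons p rest ih =>
    obtain ⟨c, n⟩ := p
    have hn : n = 1 := h (c, n) (by simp)
    simp only [frcB_find, hn]
    rw [if_neg (by omega)]
    exact ih (fun q hq => h q (by simp [hq]))

-- Once the find over the reversed stack is already some r, further folding keeps it.
theorem frcB_keep (t : List Char) (stack : List (Char × Int)) (r : String)
    (h : frcB_find stack.reverse = some r) :
    frcB_find ((t.foldl frcB_step stack).reverse) = some r := by
  induction t generalizing stack with
  | nil => simpa using h
  | cons hd t' ih =>
    match stack with
    | [] => simp [frcB_find] at h
    | (c, n) :: rest =>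
      simp only [List.foldl_cons, frcB_step]
      rw [List.reverse_cons, frcB_find_append] at h
      by_cases hc : c = hd
      · rw [if_pos hc]
        apply ih
        rw [List.reverse_cons, frcB_find_append]
        rcases ho : frcB_find rest.reverse with _ | v
        · rw [ho] at h
          simp only [Option.none_or, frcB_find] at h ⊢
          have h2 : n ≥ 2 := by by_contra hn; simp [if_neg hn] at h
          rw [if_pos h2] at h
          rw [if_pos (by omega)]
          exact h
        · rw [ho] at h
          simpa using h
      · rw [if_neg hc]
        apply ih
        show frcB_find ((hd, 1) :: (c, n) :: rest).reverse = some r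
        rw [List.reverse_cons, List.reverse_cons, List.append_assoc, frcB_find_append]
        rcases ho : frcB_find rest.reverse with _ | v
        · rw [ho] at h
          simp only [Option.none_or, List.cons_append, List.nil_append, frcB_find] at h ⊢
          have h2 : n ≥ 2 := by by_contra hn; simp [if_neg hn] at h
          rw [if_pos h2] at h ⊢
          exact h
        · rw [ho] at h
          simpa using h

-- Main invariant: with head run count 1 and all earlier runs count 1, B's remainder equals A's loop.
theorem frc_main (l : List Char) (c : Char) (rest : List (Char × Int))
    (hrest : ∀ p ∈ rest, p.2 = 1) :
    frcB_find ((l.foldl frcB_step ((c, 1) :: rest)).reverse) = frcA_loop c l := by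
  induction l generalizing c rest with
  | nil =>
    simp only [List.foldl_nil, frcA_loop]
    apply frcB_find_ones
    intro p hp
    simp only [List.mem_reverse, List.mem_cons] at hp
    rcases hp with h | h
    · simp [h]
    · exact hrest p h
  | cons hd t ih =>
    simp only [List.foldl_cons, frcB_step, frcA_loop]
    by_cases hc : hd = c
    · rw [if_pos hc.symm, if_pos hc]
      apply frcB_keep
      rw [List.reverse_cons, frcB_find_append]
      rw [frcB_find_ones rest.reverse (fun p hp => hrest p (List.mem_reverse.mp hp))]
      norm_num [frcB_find]
    · rw [if_neg (by simp [Ne.symm hc]), if_neg hc]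
      exact ih hd ((c, 1) :: rest) (by
        intro p hp
        rcases List.mem_cons.mp hp with h | h
        · simp [h]
        · exact hrest p h)

-- ===== VERDICT (by name: the statement is the Claim_ definition above) =====
theorem first_recurring_char_spec : Claim_equal_first_recurring_char := by
  intro s _
  unfold Spec_first_recurring_char first_recurring_char first_recurring_char_alt
  match h : s.toList with
  | [] => simp [frcB_find]
  | [c] => simp [frcB_step, frcB_find]
  | c :: d :: cs =>
    rw [if_neg (by simp)]
    simpa [frcB_step] using
      (frc_main (d :: cs) c [] (by simp)).symm
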